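-- pv_equiv track=rewrite | github.com/cascadeffect/BOJ | 프로그래머스/unrated/172927. 광물 캐기/광물 캐기.py | solution
-- ===== SOURCE A (Python) =====
-- import math
--
-- def solution(picks, minerals):
--     answer = 0
--
--     num_picks = sum(picks)
--     if not num_picks:
--         return answer
--
--     num_minerals = num_picks * 5
--     if len(minerals) > num_minerals:
--         minerals = minerals[:num_minerals]
--
--     cnt_minerals = [[0, 0, 0] for _ in range(math.ceil(len(minerals)/5))]
--
--     for i in range(len(minerals)):
--         if minerals[i] == 'diamond':
--             cnt_minerals[i//5][0] += 1
--         elif minerals[i] == 'iron':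
--             cnt_minerals[i//5][1] += 1
--         else:
--             cnt_minerals[i//5][2] += 1
--
--     cnt_minerals.sort(key = lambda x : (-x[0], -x[1], -x[2]))
--
--     idx = 0
--     for d, i, s in cnt_minerals:
--         while not picks[idx]:
--             idx +=1
--         if idx == 0:
--             answer += d + i + s
--         elif idx == 1:
--             answer += 5*d + i + s
--         elif idx == 2:
--             answer += 25*d + 5*i + s
--         picks[idx] -= 1
--
--     return answer
-- ===== SOURCE B (Python) =====
-- def solution(picks, minerals):
--     minerals = minerals[:sum(picks) * 5]
--
--     # Counting sort: bucket the 5-mineral chunks by their (diamond, iron, stone)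
--     # signature instead of comparison-sorting the chunk list.
--     freq = {}
--     start = 0
--     while start < len(minerals):
--         d = i = s = 0
--         for m in minerals[start:start + 5]:
--             if m == 'diamond':
--                 d += 1
--             elif m == 'iron':
--                 i += 1
--             else:
--                 s += 1
--         freq[(d, i, s)] = freq.get((d, i, s), 0) + 1
--         start += 5
--
--     # Enumerating the bounded signature space in decreasing order yields the
--     # chunks already sorted; spend the picks on them, best picks first.
--     answer = 0
--     idx = 0
--     for d in range(5, -1, -1):
--         for i in range(5 - d, -1, -1):
--             for s in range(5 - d - i, -1, -1):
--                 for _ in range(freq.get((d, i, s), 0)):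
--                     while not picks[idx]:
--                         idx += 1
--                     if idx == 0:
--                         answer += d + i + s
--                     elif idx == 1:
--                         answer += 5 * d + i + s
--                     elif idx == 2:
--                         answer += 25 * d + 5 * i + s
--                     picks[idx] -= 1
--     return answer
-- ===== Notes on version B (the rewrite author's own statement) =====
-- stated objective: alternative
-- what changed: Replaces the build-list-then-comparison-sort of the 5-mineral chunk signatures with a counting sort: signatures are bucket-counted in a dict and the bounded (d,i,s) key space is enumerated in decreasing order, which yields the chunks already sorted; the pick-spending loop then runs over that stream.
import Mathlib
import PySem

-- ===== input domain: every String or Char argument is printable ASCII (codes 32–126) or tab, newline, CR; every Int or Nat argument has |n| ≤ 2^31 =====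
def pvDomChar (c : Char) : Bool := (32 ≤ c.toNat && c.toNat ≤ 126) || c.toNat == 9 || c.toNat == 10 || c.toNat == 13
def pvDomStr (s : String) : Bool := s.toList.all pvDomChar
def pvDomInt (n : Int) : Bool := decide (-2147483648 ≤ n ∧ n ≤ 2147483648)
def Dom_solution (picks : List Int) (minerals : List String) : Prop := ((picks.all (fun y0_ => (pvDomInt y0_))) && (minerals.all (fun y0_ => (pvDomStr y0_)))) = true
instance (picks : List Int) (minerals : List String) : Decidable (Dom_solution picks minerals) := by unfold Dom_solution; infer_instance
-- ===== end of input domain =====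

-- B replaces A's comparison sort of the 5-mineral chunk signatures by a counting sort: a bucket
-- count over the bounded (d,i,s) key space enumerated in decreasing order (alternative algorithm,
-- same measured cost). Both A and B mutate `picks` in place (the same decrements); the
-- equivalence proved here is about the return value.

-- ===== PORT A =====
-- the if/elif/else classification of one mineral name (identical in both Pythons)
def bumpMineral (t : Int × Int × Int) (m : String) : Int × Int × Int :=
  if m = "diamond" then (t.1 + 1, t.2.1, t.2.2)
  else if m = "iron" then (t.1, t.2.1 + 1, t.2.2)
  else (t.1, t.2.1, t.2.2 + 1)

-- A's sort key: Python's tuple comparison (-a0,-a1,-a2) < (-b0,-b1,-b2), written out lexicographically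
def solutionLexBefore (a b : Int × Int × Int) : Bool :=
  decide (-a.1 < -b.1 ∨ (-a.1 = -b.1 ∧ (-a.2.1 < -b.2.1 ∨ (-a.2.1 = -b.2.1 ∧ -a.2.2 < -b.2.2))))

-- 'while not picks[idx]: idx += 1'; none = the loop runs past the end (IndexError)
def solutionFindIdx (picks : List Int) (idx : Nat) : Option Nat :=
  if h : idx < picks.length then
    if picks[idx] = 0 then solutionFindIdx picks (idx + 1) else some idx
  else none
termination_by picks.length - idx

-- 'for d, i, s in cnt_minerals: …' with the pick pointer; on the IndexError path of the
-- while loop (never taken when the Python returns) the port returns the answer so far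
def solutionAssign (groups : List (Int × Int × Int)) (answer : Int) (idx : Nat) (picks : List Int) : Int :=
  match groups with
  | [] => answer
  | (d, i, s) :: rest =>
    match solutionFindIdx picks idx with
    | none => answer
    | some j =>
      solutionAssign rest
        (if j = 0 then answer + (d + i + s)
          else if j = 1 then answer + (5 * d + i + s)
          else if j = 2 then answer + (25 * d + 5 * i + s)
          else answer)
        j (picks.set j (picks.getD j 0 - 1))

def solution (picks : List Int) (minerals : List String) : Int :=
  let answer : Int := 0
  let num_picks := picks.sum
  if num_picks = 0 then answer
  else
    let num_minerals := num_picks * 5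
    let minerals' := if PySem.List.len minerals > num_minerals then PySem.List.slice minerals none (some num_minerals) else minerals
    -- math.ceil(len(minerals)/5); exact: the float division is exact on any reachable length
    let cnt0 : List (Int × Int × Int) := List.replicate ((minerals'.length + 4) / 5) (0, 0, 0)
    let cnt := (PySem.List.pyRange 0 (PySem.List.len minerals') 1).foldl
      (fun c i =>
        PySem.List.pySetD c (PySem.Int.floordiv i 5)
          (bumpMineral (PySem.List.pyGetD c (PySem.Int.floordiv i 5) (0, 0, 0)) (PySem.List.pyGetD minerals' i "")))
      cnt0
    -- cnt_minerals.sort(key=λx.(-x0,-x1,-x2)): PySem's stable insertion sort, the 3-tuple key written out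
    let sortedGroups := cnt.foldl (fun acc x => PySem.List.insertBy solutionLexBefore x acc) []
    solutionAssign sortedGroups answer 0 picks

-- ===== PORT B =====
-- 'while start < len(minerals): …' — count each 5-chunk's signature into freq
def solutionAltCount (freq : PySem.Dict (Int × Int × Int) Int) (minerals : List String) (start : Nat) : PySem.Dict (Int × Int × Int) Int :=
  if _h : start < minerals.length then
    let t := (PySem.List.slice minerals (some (start : Int)) (some ((start : Int) + 5))).foldl bumpMineral (0, 0, 0)
    solutionAltCount (freq.insert t (freq.getD t 0 + 1)) minerals (start + 5)
  else freq
termination_by minerals.length - start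

-- keys enumerated by B's three nested 'range(…, -1, -1)' loops, flattened
def solutionAltKeys : List (Int × Int × Int) :=
  (PySem.List.pyRange 5 (-1) (-1)).flatMap fun d =>
    (PySem.List.pyRange (5 - d) (-1) (-1)).flatMap fun i =>
      (PySem.List.pyRange (5 - d - i) (-1) (-1)).map fun s => (d, i, s)

-- 'while not picks[idx]: idx += 1' (B's inner while loop; none = IndexError, unreachable)
def solutionAltFind (picks : List Int) (idx : Nat) : Option Nat :=
  if h : idx < picks.length then
    if picks[idx] = 0 then solutionAltFind picks (idx + 1) else some idx
  else none
termination_by picks.length - idx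

-- the body of B's innermost loop: spend one pick on one chunk of signature k
def solutionAltSpend (k : Int × Int × Int) (st : Int × Nat × List Int) : Int × Nat × List Int :=
  match solutionAltFind st.2.2 st.2.1 with
  | none => st
  | some j =>
    ((if j = 0 then st.1 + (k.1 + k.2.1 + k.2.2)
       else if j = 1 then st.1 + (5 * k.1 + k.2.1 + k.2.2)
       else if j = 2 then st.1 + (25 * k.1 + 5 * k.2.1 + k.2.2)
       else st.1), j, st.2.2.set j (st.2.2.getD j 0 - 1))

def solution_alt (picks : List Int) (minerals : List String) : Int :=
  let minerals' := PySem.List.slice minerals none (some (picks.sum * 5))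
  let freq := solutionAltCount PySem.Dict.empty minerals' 0
  let res := solutionAltKeys.foldl
      (fun (st : Int × Nat × List Int) k =>
        (PySem.List.pyRange 0 (freq.getD k 0) 1).foldl (fun st _ => solutionAltSpend k st) st)
      ((0 : Int), (0 : Nat), picks)
  res.1

-- ===== PRECONDITION & SPEC =====
def Spec_solution (picks : List Int) (minerals : List String) (out : Int) : Prop := out = solution_alt picks minerals
instance (picks : List Int) (minerals : List String) (out : Int) : Decidable (Spec_solution picks minerals out) := by unfold Spec_solution; infer_instance

-- ===== CLAIM (what is proved, stated in full; the proofs are below) =====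
def Claim_equal_solution : Prop := ∀ (picks : List Int) (minerals : List String), Dom_solution picks minerals → Spec_solution picks minerals (solution picks minerals)

-- ===== LEMMAS AND PROOFS =====

-- spec-side vocabulary
def countTriple (c : List String) : Int × Int × Int := c.foldl bumpMineral (0, 0, 0)

def chunksOf (ml : List String) : List (Int × Int × Int) :=
  if ml = [] then [] else countTriple (ml.take 5) :: chunksOf (ml.drop 5)
termination_by ml.length
decreasing_by rename_i h; cases ml with | nil => exact absurd rfl h | cons a l => simp

def TripleBounded (x : Int × Int × Int) : Prop :=
  0 ≤ x.1 ∧ 0 ≤ x.2.1 ∧ 0 ≤ x.2.2 ∧ x.1 + x.2.1 + x.2.2 ≤ 5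

def lexLe (a b : Int × Int × Int) : Prop :=
  b.1 < a.1 ∨ (b.1 = a.1 ∧ (b.2.1 < a.2.1 ∨ (b.2.1 = a.2.1 ∧ b.2.2 ≤ a.2.2)))

def expandKeys (cnt : List (Int × Int × Int)) : List (Int × Int × Int) :=
  solutionAltKeys.flatMap fun k => List.replicate (cnt.count k) k

-- facts about the lexicographic key order
def lexLt (a b : Int × Int × Int) : Prop :=
  b.1 < a.1 ∨ (b.1 = a.1 ∧ (b.2.1 < a.2.1 ∨ (b.2.1 = a.2.1 ∧ b.2.2 < a.2.2)))

theorem lexBefore_iff (a b : Int × Int × Int) : solutionLexBefore a b = true ↔ lexLt a b := by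
  obtain ⟨a1, a2, a3⟩ := a; obtain ⟨b1, b2, b3⟩ := b
  simp only [solutionLexBefore, lexLt, decide_eq_true_eq]
  omega

theorem lexLt_le {a b : Int × Int × Int} (h : lexLt a b) : lexLe a b := by
  simp only [lexLt, lexLe] at *; omega

theorem lexBefore_false_le {a b : Int × Int × Int} (h : solutionLexBefore a b = false) : lexLe b a := by
  have h' : ¬ lexLt a b := by rw [← lexBefore_iff, h]; simp
  obtain ⟨a1, a2, a3⟩ := a; obtain ⟨b1, b2, b3⟩ := b
  simp only [lexLt, lexLe] at *
  omega

theorem lexLe_refl (a : Int × Int × Int) : lexLe a a :=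
  Or.inr ⟨rfl, Or.inr ⟨rfl, le_rfl⟩⟩

theorem lexLe_trans {a b c : Int × Int × Int} (h1 : lexLe a b) (h2 : lexLe b c) : lexLe a c := by
  simp only [lexLe] at *; omega

theorem lexLe_antisymm {a b : Int × Int × Int} (h1 : lexLe a b) (h2 : lexLe b a) : a = b := by
  obtain ⟨a1, a2, a3⟩ := a; obtain ⟨b1, b2, b3⟩ := b
  simp only [lexLe, Prod.mk.injEq] at *
  omega

-- small list helpers
theorem getD_append_length {α : Type} (l : List α) (y : α) (t : List α) (d : α) :
    (l ++ y :: t).getD l.length d = y := by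
  induction l with
  | nil => rfl
  | cons a l _ => simp

theorem set_append_length {α : Type} (l : List α) (y : α) (t : List α) (v : α) :
    (l ++ y :: t).set l.length v = l ++ v :: t := by
  induction l with
  | nil => rfl
  | cons a l ih => simp [ih]

-- (1) the conditional trim equals the unconditional slice
theorem trim_eq (ml : List String) (nm : Int) :
    (if PySem.List.len ml > nm then PySem.List.slice ml none (some nm) else ml) = PySem.List.slice ml none (some nm) := by
  split_ifs with h
  · rfl
  · rw [PySem.List.len_eq] at h
    have h0 : (0 : Int) ≤ nm := by omega
    have h1 : ml.length ≤ nm.toNat := by omega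
    rw [PySem.List.slice_to ml h0, List.take_of_length_le h1]

-- the per-chunk inner step of A's bucket loop
theorem setq_fold (c : List String) : ∀ (s : Int) (acc : List (Int × Int × Int)) (q : Nat),
    q < acc.length →
    (∀ j : Int, s ≤ j → j < s + c.length → PySem.Int.floordiv j 5 = (q : Int)) →
    (PySem.List.enumerate c s).foldl
      (fun cl p =>
        PySem.List.pySetD cl (PySem.Int.floordiv p.1 5)
          (bumpMineral (PySem.List.pyGetD cl (PySem.Int.floordiv p.1 5) (0, 0, 0)) p.2))
      acc = acc.set q (c.foldl bumpMineral (acc.getD q (0, 0, 0))) := by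
  induction c with
  | nil =>
    intro s acc q hq _
    simp only [PySem.List.enumerate_nil, List.foldl_nil]
    rw [List.getD_eq_getElem?_getD, List.getElem?_eq_getElem hq, Option.getD_some]
    exact (List.set_getElem_self hq).symm
  | cons m c ih =>
    intro s acc q hq hidx
    rw [PySem.List.enumerate_cons, List.foldl_cons]
    have h5 : PySem.Int.floordiv s 5 = (q : Int) := by
      refine hidx s le_rfl ?_
      simp only [List.length_cons]
      push_cast
      omega
    rw [h5, PySem.List.pySetD_natCast, PySem.List.pyGetD_natCast]
    rw [ih (s + 1) _ q (by simpa using hq)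
      (fun j h1 h2 => hidx j (by omega) (by simp only [List.length_cons] at h2 ⊢; push_cast at h2 ⊢; omega))]
    rw [List.set_set, List.foldl_cons]
    have hgd : (acc.set q (bumpMineral (acc.getD q (0, 0, 0)) m)).getD q (0, 0, 0)
        = bumpMineral (acc.getD q (0, 0, 0)) m := by
      rw [List.getD_eq_getElem?_getD, List.getElem?_set_self', List.getElem?_eq_getElem hq]
      rfl
    rw [hgd]

theorem chunksOf_nil : chunksOf [] = [] := by rw [chunksOf]; simp

-- the invariant of A's bucket loop: five indices at a time
theorem cnt_inv (n : Nat) : ∀ (ml : List String), ml.length = n → ∀ (q : Nat) (done : List (Int × Int × Int)),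
    done.length = q →
    (PySem.List.enumerate ml (5 * q)).foldl
      (fun cl p =>
        PySem.List.pySetD cl (PySem.Int.floordiv p.1 5)
          (bumpMineral (PySem.List.pyGetD cl (PySem.Int.floordiv p.1 5) (0, 0, 0)) p.2))
      (done ++ List.replicate ((ml.length + 4) / 5) (0, 0, 0)) = done ++ chunksOf ml := by
  induction n using Nat.strong_induction_on with
  | _ n ih =>
  intro ml hml q done hq
  by_cases hne : ml = []
  · subst hne
    simp [chunksOf_nil]
  · have hlen1 : 0 < ml.length := List.length_pos_of_ne_nil hne
    have hsplit : ml = ml.take 5 ++ ml.drop 5 := (List.take_append_drop 5 ml).symm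
    have hM : 1 ≤ (ml.length + 4) / 5 := by omega
    have henum : PySem.List.enumerate ml (5 * (q : Int)) =
        PySem.List.enumerate (ml.take 5) (5 * (q : Int)) ++
          PySem.List.enumerate (ml.drop 5) (5 * (q : Int) + ((ml.take 5).length : Int)) := by
      conv_lhs => rw [hsplit]
      rw [PySem.List.enumerate_append]
    rw [henum, List.foldl_append]
    have hrep : List.replicate ((ml.length + 4) / 5) ((0:Int), (0:Int), (0:Int)) =
        (0, 0, 0) :: List.replicate ((ml.length + 4) / 5 - 1) (0, 0, 0) := by
      rw [← List.replicate_succ]; congr 1; omega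
    rw [hrep]
    rw [setq_fold (ml.take 5) (5 * (q : Int)) _ q (by simp [hq])
        (by
          intro j h1 h2
          rw [PySem.Int.floordiv_eq_iff_of_pos (by norm_num)]
          have ht5 : (ml.take 5).length ≤ 5 := by simp
          omega)]
    rw [← hq, getD_append_length, set_append_length, hq]
    have hcnt : (ml.take 5).foldl bumpMineral ((0:Int), (0:Int), (0:Int)) = countTriple (ml.take 5) := rfl
    rw [hcnt]
    have hstep : chunksOf ml = countTriple (ml.take 5) :: chunksOf (ml.drop 5) := by
      rw [chunksOf, if_neg hne]
    by_cases h5 : ml.length ≤ 5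
    · have hdrop : ml.drop 5 = [] := List.drop_eq_nil_of_le h5
      rw [hdrop]
      simp only [PySem.List.enumerate_nil, List.foldl_nil]
      have h10 : (ml.length + 4) / 5 - 1 = 0 := by omega
      rw [h10, hstep, hdrop, chunksOf_nil]
      simp
    · have hlen5 : ((ml.take 5).length : Int) = 5 := by simp; omega
      rw [hlen5]
      have harr : done ++ countTriple (ml.take 5) :: List.replicate ((ml.length + 4) / 5 - 1) ((0:Int),(0:Int),(0:Int)) =
          (done ++ [countTriple (ml.take 5)]) ++ List.replicate (((ml.drop 5).length + 4) / 5) (0, 0, 0) := by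
        have hq5 : ((ml.drop 5).length + 4) / 5 = (ml.length + 4) / 5 - 1 := by
          rw [List.length_drop]; omega
        rw [hq5]; simp
      rw [harr]
      have hstart : 5 * (q : Int) + 5 = 5 * (((q + 1 : Nat)) : Int) := by push_cast; ring
      rw [hstart]
      rw [ih (ml.drop 5).length (by rw [List.length_drop]; omega) (ml.drop 5) rfl (q + 1)
          (done ++ [countTriple (ml.take 5)]) (by simp [hq])]
      rw [hstep]
      simp

-- (2) A's bucket-update loop computes the chunk signatures
theorem cnt_eq_chunks (ml : List String) :
    (PySem.List.pyRange 0 (PySem.List.len ml) 1).foldl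
      (fun c i =>
        PySem.List.pySetD c (PySem.Int.floordiv i 5)
          (bumpMineral (PySem.List.pyGetD c (PySem.Int.floordiv i 5) (0, 0, 0)) (PySem.List.pyGetD ml i "")))
      (List.replicate ((ml.length + 4) / 5) (0, 0, 0)) = chunksOf ml := by
  have hmap := PySem.List.enumerate_eq_map_pyRange ml ""
  have hconv : (PySem.List.pyRange 0 (PySem.List.len ml) 1).foldl
      (fun c i =>
        PySem.List.pySetD c (PySem.Int.floordiv i 5)
          (bumpMineral (PySem.List.pyGetD c (PySem.Int.floordiv i 5) (0, 0, 0)) (PySem.List.pyGetD ml i "")))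
      (List.replicate ((ml.length + 4) / 5) (0, 0, 0))
      = (PySem.List.enumerate ml 0).foldl
      (fun cl p =>
        PySem.List.pySetD cl (PySem.Int.floordiv p.1 5)
          (bumpMineral (PySem.List.pyGetD cl (PySem.Int.floordiv p.1 5) (0, 0, 0)) p.2))
      (List.replicate ((ml.length + 4) / 5) (0, 0, 0)) := by
    rw [show PySem.List.enumerate ml 0 = PySem.List.enumerate ml from rfl, hmap, List.foldl_map]
  rw [hconv]
  have h0 : (0 : Int) = 5 * ((0 : Nat) : Int) := by norm_num
  rw [show PySem.List.enumerate ml 0 = PySem.List.enumerate ml (5 * ((0 : Nat) : Int)) from by rw [← h0]]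
  have := cnt_inv ml.length ml rfl 0 [] rfl
  simpa using this

-- (3) chunk signatures are bounded
theorem countTriple_bounds (c : List String) : ∀ (acc : Int × Int × Int),
    acc.1 ≤ (c.foldl bumpMineral acc).1 ∧ acc.2.1 ≤ (c.foldl bumpMineral acc).2.1 ∧
    acc.2.2 ≤ (c.foldl bumpMineral acc).2.2 ∧
    (c.foldl bumpMineral acc).1 + (c.foldl bumpMineral acc).2.1 + (c.foldl bumpMineral acc).2.2
      = acc.1 + acc.2.1 + acc.2.2 + c.length := by
  induction c with
  | nil => intro acc; simp
  | cons m c ih =>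
    intro acc
    have h := ih (bumpMineral acc m)
    simp only [List.foldl_cons, List.length_cons]
    unfold bumpMineral at *
    split_ifs at * <;> simp only at h ⊢ <;> push_cast at h ⊢ <;> omega

theorem chunks_bounded (ml : List String) : ∀ x ∈ chunksOf ml, TripleBounded x := by
  induction hn : ml.length using Nat.strong_induction_on generalizing ml with
  | _ n ih =>
  intro x hx
  rw [chunksOf] at hx
  split_ifs at hx with h
  · simp at hx
  · have hlen1 : 0 < ml.length := List.length_pos_of_ne_nil h
    simp only [List.mem_cons] at hx
    rcases hx with hx | hx
    · subst hx
      have hb := countTriple_bounds (ml.take 5) (0, 0, 0)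
      have hl : (ml.take 5).length ≤ 5 := by simp
      unfold TripleBounded countTriple
      push_cast at hb
      omega
    · exact ih (ml.drop 5).length (by rw [List.length_drop]; omega) (ml.drop 5) rfl x hx

-- (4) A's insertion sort equals B's bucket enumeration
theorem insertBy_perm (f : (Int × Int × Int) → (Int × Int × Int) → Bool) (x : Int × Int × Int)
    (l : List (Int × Int × Int)) : (PySem.List.insertBy f x l).Perm (x :: l) := by
  induction l with
  | nil => exact List.Perm.refl _
  | cons y ys ih =>
    rw [PySem.List.insertBy]
    split_ifs with h
    · exact List.Perm.refl _
    · exact ((ih.cons y).trans (List.Perm.swap x y ys))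

theorem foldl_insertBy_perm (f : (Int × Int × Int) → (Int × Int × Int) → Bool)
    (l : List (Int × Int × Int)) : ∀ acc, (l.foldl (fun acc x => PySem.List.insertBy f x acc) acc).Perm (l ++ acc) := by
  induction l with
  | nil => intro acc; simp
  | cons x l ih =>
    intro acc
    have h1 := ih (PySem.List.insertBy f x acc)
    have h2 : (PySem.List.insertBy f x acc).Perm (x :: acc) := insertBy_perm f x acc
    exact h1.trans (((h2.append_left l)).trans List.perm_middle)

theorem insertBy_sorted (x : Int × Int × Int) (l : List (Int × Int × Int))
    (h : l.Pairwise lexLe) : (PySem.List.insertBy solutionLexBefore x l).Pairwise lexLe := by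
  induction l with
  | nil => exact List.pairwise_singleton _ _
  | cons y ys ih =>
    rw [PySem.List.insertBy]
    rw [List.pairwise_cons] at h
    split_ifs with hb
    · rw [List.pairwise_cons]
      refine ⟨?_, List.pairwise_cons.mpr h⟩
      intro b hb'
      rcases List.mem_cons.mp hb' with rfl | hmem
      · exact lexLt_le ((lexBefore_iff _ _).mp hb)
      · exact lexLe_trans (lexLt_le ((lexBefore_iff _ _).mp hb)) (h.1 b hmem)
    · rw [List.pairwise_cons]
      refine ⟨?_, ih h.2⟩
      intro b hb'
      rcases (PySem.List.mem_insertBy _ _ _ _).mp hb' with rfl | hmem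
      · exact lexBefore_false_le (by simpa using hb)
      · exact h.1 b hmem

theorem foldl_insertBy_sorted (l : List (Int × Int × Int)) : ∀ acc, acc.Pairwise lexLe →
    (l.foldl (fun acc x => PySem.List.insertBy solutionLexBefore x acc) acc).Pairwise lexLe := by
  induction l with
  | nil => intro acc h; exact h
  | cons x l ih => intro acc h; exact ih _ (insertBy_sorted x acc h)

theorem mem_solutionAltKeys (t : Int × Int × Int) :
    t ∈ solutionAltKeys ↔ (0 ≤ t.1 ∧ 0 ≤ t.2.1 ∧ 0 ≤ t.2.2 ∧ t.1 + t.2.1 + t.2.2 ≤ 5) := by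
  obtain ⟨d, i, s⟩ := t
  simp only [solutionAltKeys, List.mem_flatMap, List.mem_map, PySem.List.mem_pyRange_neg_one,
    Prod.mk.injEq]
  constructor
  · rintro ⟨d', hd', i', hi', s', hs', rfl, rfl, rfl⟩
    omega
  · rintro ⟨h1, h2, h3, h4⟩
    exact ⟨d, by omega, i, by omega, s, by omega, rfl, rfl, rfl⟩

theorem nodup_solutionAltKeys : solutionAltKeys.Nodup := by decide

theorem pairwise_solutionAltKeys : solutionAltKeys.Pairwise lexLt := by
  have h : solutionAltKeys.Pairwise (fun a b => solutionLexBefore a b = true) := by decide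
  exact h.imp (fun h => (lexBefore_iff _ _).mp h)

theorem count_flatMap_replicate (c : (Int × Int × Int) → Nat) (t : Int × Int × Int) :
    ∀ ks : List (Int × Int × Int), ks.Nodup →
    ((ks.flatMap fun k => List.replicate (c k) k).count t) = if t ∈ ks then c t else 0 := by
  intro ks
  induction ks with
  | nil => simp
  | cons k ks ih =>
    intro hnd
    rw [List.nodup_cons] at hnd
    rw [List.flatMap_cons, List.count_append, List.count_replicate, ih hnd.2]
    by_cases hk : t = k
    · subst hk
      simp [hnd.1]
    · simp [hk, Ne.symm hk, beq_iff_eq]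

theorem flatMap_replicate_pairwise (c : (Int × Int × Int) → Nat) :
    ∀ ks : List (Int × Int × Int), ks.Pairwise lexLt →
    (ks.flatMap fun k => List.replicate (c k) k).Pairwise lexLe := by
  intro ks
  induction ks with
  | nil => simp
  | cons k ks ih =>
    intro h
    rw [List.pairwise_cons] at h
    rw [List.flatMap_cons, List.pairwise_append]
    refine ⟨?_, ih h.2, ?_⟩
    · rw [List.pairwise_replicate]
      right; exact lexLe_refl k
    · intro a ha b hb
      have ha' : a = k := List.eq_of_mem_replicate ha
      subst ha'
      obtain ⟨k', hk', hb'⟩ := List.mem_flatMap.mp hb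
      have hb'' : b = k' := List.eq_of_mem_replicate hb'
      subst hb''
      exact lexLt_le (h.1 b hk')

theorem expand_pairwise (cnt : List (Int × Int × Int)) : (expandKeys cnt).Pairwise lexLe := by
  unfold expandKeys
  exact flatMap_replicate_pairwise _ solutionAltKeys pairwise_solutionAltKeys

theorem expand_perm (cnt : List (Int × Int × Int)) (hb : ∀ x ∈ cnt, TripleBounded x) :
    (expandKeys cnt).Perm cnt := by
  rw [List.perm_iff_count]
  intro t
  unfold expandKeys
  rw [count_flatMap_replicate _ t _ nodup_solutionAltKeys]
  by_cases ht : t ∈ solutionAltKeys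
  · simp [ht]
  · rw [if_neg ht]
    have hnm : t ∉ cnt := fun hc => ht ((mem_solutionAltKeys t).mpr (hb t hc))
    simp [List.count_eq_zero.mpr hnm]

theorem sort_eq_expand (cnt : List (Int × Int × Int)) (hb : ∀ x ∈ cnt, TripleBounded x) :
    cnt.foldl (fun acc x => PySem.List.insertBy solutionLexBefore x acc) [] = expandKeys cnt := by
  apply List.Perm.eq_of_pairwise (le := lexLe)
    (fun a b _ _ h1 h2 => lexLe_antisymm h1 h2)
  · exact foldl_insertBy_sorted cnt [] (by simp)
  · exact expand_pairwise cnt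
  · have h1 : (cnt.foldl (fun acc x => PySem.List.insertBy solutionLexBefore x acc) []).Perm cnt := by
      simpa using foldl_insertBy_perm solutionLexBefore cnt []
    exact h1.trans (expand_perm cnt hb).symm

-- (6) B's counting pass: the dict counts chunk signatures
theorem altCount_spec (ml : List String) : ∀ (fuel start : Nat), ml.length ≤ start + 5 * fuel →
    ∀ (freq : PySem.Dict (Int × Int × Int) Int),
    ∀ k, (solutionAltCount freq ml start).getD k 0 = freq.getD k 0 + ((chunksOf (ml.drop start)).count k : Int) := by
  intro fuel
  induction fuel with
  | zero =>
    intro start hle freq k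
    rw [solutionAltCount, dif_neg (by omega), List.drop_eq_nil_of_le (by omega), chunksOf_nil]
    simp
  | succ fuel ih =>
    intro start hle freq k
    rw [solutionAltCount]
    by_cases h : start < ml.length
    · rw [dif_pos h]
      have hdne : ml.drop start ≠ [] := by
        rw [ne_eq, List.drop_eq_nil_iff]; omega
      have hchunk : chunksOf (ml.drop start) = countTriple ((ml.drop start).take 5) :: chunksOf (ml.drop (start + 5)) := by
        rw [chunksOf, if_neg hdne, List.drop_drop]
      have hslice : PySem.List.slice ml (some (start : Int)) (some ((start : Int) + 5)) = (ml.drop start).take 5 := by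
        rw [show ((start : Int) + 5) = ((start : Int) + ((5 : Nat) : Int)) from by norm_num]
        exact PySem.List.slice_natCast_add ml start 5
      have ht : (PySem.List.slice ml (some (start : Int)) (some ((start : Int) + 5))).foldl bumpMineral ((0:Int), (0:Int), (0:Int))
          = countTriple ((ml.drop start).take 5) := by rw [hslice]; rfl
      have ihg := ih (start + 5) (by omega)
        (freq.insert ((PySem.List.slice ml (some (start : Int)) (some ((start : Int) + 5))).foldl bumpMineral (0, 0, 0))
          (freq.getD ((PySem.List.slice ml (some (start : Int)) (some ((start : Int) + 5))).foldl bumpMineral (0, 0, 0)) 0 + 1))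
        k
      rw [ihg, PySem.Dict.getD_insert, hchunk, ht, List.count_cons]
      by_cases hk : k = countTriple ((ml.drop start).take 5)
      · subst hk
        rw [if_pos rfl, if_pos (beq_self_eq_true _)]
        push_cast
        ring
      · rw [if_neg hk, if_neg (by simpa [beq_iff_eq] using Ne.symm hk)]
        push_cast
        ring
    · rw [dif_neg h, List.drop_eq_nil_of_le (by omega), chunksOf_nil]
      simp

-- B's inner while loop is A's while loop
theorem altFind_eq (picks : List Int) : ∀ (fuel idx : Nat), picks.length ≤ idx + fuel →
    solutionAltFind picks idx = solutionFindIdx picks idx := by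
  intro fuel
  induction fuel with
  | zero =>
    intro idx h
    rw [solutionAltFind, solutionFindIdx, dif_neg (by omega), dif_neg (by omega)]
  | succ fuel ih =>
    intro idx h
    rw [solutionAltFind, solutionFindIdx]
    by_cases hlt : idx < picks.length
    · rw [dif_pos hlt, dif_pos hlt]
      split_ifs with h0
      · exact ih (idx + 1) (by omega)
      · rfl
    · rw [dif_neg hlt, dif_neg hlt]

theorem spend_stuck (k : Int × Int × Int) (a : Int) (idx : Nat) (picks : List Int)
    (hnone : solutionAltFind picks idx = none) :
    solutionAltSpend k (a, idx, picks) = (a, idx, picks) := by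
  simp [solutionAltSpend, hnone]

-- (7) A's pick-spending recursion is B's fold of solutionAltSpend over the same group stream
theorem assign_eq_foldl : ∀ (groups : List (Int × Int × Int)) (a : Int) (idx : Nat) (picks : List Int),
    solutionAssign groups a idx picks
      = (groups.foldl (fun st k => solutionAltSpend k st) (a, idx, picks)).1 := by
  intro groups
  induction groups with
  | nil => intro a idx picks; simp [solutionAssign]
  | cons g rest ih =>
    intro a idx picks
    obtain ⟨d, i, s⟩ := g
    rw [solutionAssign, List.foldl_cons]
    cases hfind : solutionFindIdx picks idx with
    | none =>
      have hAlt : solutionAltFind picks idx = none := by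
        rw [altFind_eq picks picks.length idx (by omega), hfind]
      have hstuck : ∀ gs : List (Int × Int × Int),
          gs.foldl (fun st k => solutionAltSpend k st) (a, idx, picks) = (a, idx, picks) := by
        intro gs
        induction gs with
        | nil => rfl
        | cons g' gs' ih2 => rw [List.foldl_cons, spend_stuck _ _ _ _ hAlt, ih2]
      rw [spend_stuck _ _ _ _ hAlt, hstuck]
    | some j =>
      show solutionAssign rest
          (if j = 0 then a + (d + i + s)
            else if j = 1 then a + (5 * d + i + s)
            else if j = 2 then a + (25 * d + 5 * i + s)
            else a)
          j (picks.set j (picks.getD j 0 - 1)) = _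
      have hAlt : solutionAltFind picks idx = some j := by
        rw [altFind_eq picks picks.length idx (by omega), hfind]
      have hspend : solutionAltSpend (d, i, s) (a, idx, picks)
          = ((if j = 0 then a + (d + i + s)
               else if j = 1 then a + (5 * d + i + s)
               else if j = 2 then a + (25 * d + 5 * i + s)
               else a), j, picks.set j (picks.getD j 0 - 1)) := by
        simp [solutionAltSpend, hAlt]
      rw [hspend]
      exact ih _ j _

-- (8) flattening B's key/count double loop into a fold over the expanded group stream
theorem foldl_ignore {σ : Type} (g : σ → (Int × Int × Int) → σ) (k : Int × Int × Int) :
    ∀ (l : List Int) (st : σ), l.foldl (fun st _ => g st k) st = (List.replicate l.length k).foldl g st := by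
  intro l
  induction l with
  | nil => intro st; rfl
  | cons x xs ih =>
    intro st
    rw [List.foldl_cons, List.length_cons, List.replicate_succ, List.foldl_cons, ih]

theorem inner_flat {σ : Type} (g : σ → (Int × Int × Int) → σ) (k : Int × Int × Int) (n : Nat) (st : σ) :
    (PySem.List.pyRange 0 ((n : Nat) : Int) 1).foldl (fun st _ => g st k) st
      = (List.replicate n k).foldl g st := by
  rw [foldl_ignore, show (PySem.List.pyRange 0 ((n : Nat) : Int) 1).length = n from by
    rw [PySem.List.length_pyRange_one]; simp]

theorem keys_flat {σ : Type} (g : σ → (Int × Int × Int) → σ) (c : (Int × Int × Int) → Nat) :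
    ∀ (ks : List (Int × Int × Int)) (st : σ),
    ks.foldl (fun st k => (PySem.List.pyRange 0 ((c k : Nat) : Int) 1).foldl (fun st _ => g st k) st) st
      = (ks.flatMap fun k => List.replicate (c k) k).foldl g st := by
  intro ks
  induction ks with
  | nil => intro st; rfl
  | cons k ks ih =>
    intro st
    rw [List.foldl_cons, List.flatMap_cons, List.foldl_append, inner_flat, ih]

-- ===== VERDICT (by name: the statement is the Claim_ definition above) =====
theorem solution_spec : Claim_equal_solution := by
  intro picks minerals _hdom
  unfold Spec_solution
  show solution picks minerals = solution_alt picks minerals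
  set ml' := PySem.List.slice minerals none (some (picks.sum * 5)) with hml'
  have hgetD := fun k => altCount_spec ml' ml'.length 0 (by omega) PySem.Dict.empty k
  simp only [List.drop_zero] at hgetD
  have hfun : (fun (st : Int × Nat × List Int) k =>
      (PySem.List.pyRange 0 ((solutionAltCount PySem.Dict.empty ml' 0).getD k 0) 1).foldl
        (fun st _ => solutionAltSpend k st) st)
      = (fun (st : Int × Nat × List Int) k =>
      (PySem.List.pyRange 0 ((((chunksOf ml').count k : Nat)) : Int) 1).foldl
        (fun st _ => solutionAltSpend k st) st) := by
    funext st k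
    rw [hgetD k]
    simp
  have hB : solution_alt picks minerals
      = ((expandKeys (chunksOf ml')).foldl (fun st k => solutionAltSpend k st) ((0 : Int), (0 : Nat), picks)).1 := by
    show ((solutionAltKeys.foldl _ ((0 : Int), (0 : Nat), picks) : Int × Nat × List Int)).1 = _
    rw [← hml', hfun, keys_flat]
    rfl
  by_cases h0 : picks.sum = 0
  · have hml0 : ml' = [] := by
      rw [hml', h0, show (0 : Int) * 5 = ((0 : Nat) : Int) from by norm_num,
        PySem.List.slice_to_natCast]
      rfl
    have hE : expandKeys ([] : List (Int × Int × Int)) = [] := by simp [expandKeys]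
    rw [hB, hml0, chunksOf_nil, hE]
    unfold solution
    simp [h0]
  · have hA : solution picks minerals
        = ((expandKeys (chunksOf ml')).foldl (fun st k => solutionAltSpend k st) ((0 : Int), (0 : Nat), picks)).1 := by
      unfold solution
      simp only [h0, if_false]
      rw [trim_eq, ← hml', cnt_eq_chunks ml', sort_eq_expand _ (chunks_bounded ml'),
        assign_eq_foldl]
    rw [hA, hB]
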